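-- pv_equiv track=rewrite | github.com/zeunala/ProblemSolving | Programmers/2022.01-2022.03/Lv1_72410.py | solution
-- ===== SOURCE A (Python) =====
-- def solution(new_id):
--     # 1단계
--     step1 = new_id.lower()
--
--     # 2단계
--     step2 = ""
--     for e in step1:
--         if e in "abcdefghijklmnopqrstuvwxyz0123456789-_.":
--             step2 += e
--
--     # 3단계
--     step3 = ""
--     lastChar = ""
--     for e in step2:
--         if e == "." and lastChar == ".": # 연속 .는 패스
--             continue
--         else:
--             lastChar = e
--             step3 += e
--
--     # 4단계
--     step4 = ""
--     if step3[0] == ".":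
--         step4 = step3[1:-1]
--     else:
--         step4 = step3[0:-1]
--     if step3[-1] != ".":
--         step4 += step3[-1]
--
--     # 5단계
--     step5 = ""
--     if step4 == "":
--         step5 = "a"
--     else:
--         step5 = step4
--
--
--     # 6단계
--     step6 = ""
--     if len(step5) >= 16:
--         if step5[14] == ".":
--             step6 = step5[:14]
--         else:
--             step6 = step5[:15]
--     else:
--         step6 = step5
--
--     # 7단계
--     step7 = step6
--     while len(step7) <= 2:
--         step7 += step7[-1]
--
--     return step7
-- ===== SOURCE B (Python) =====
-- def solution(new_id):
--     # Tokenize-by-dots strategy: instead of A's stateful char-by-char dedup loop and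
--     # index-based edge trimming, split the filtered id on '.', drop empty tokens and
--     # re-join -- this collapses dot runs and trims boundary dots in one conceptual step.
--     allowed = "abcdefghijklmnopqrstuvwxyz0123456789-_."
--     filtered = "".join(c for c in new_id.lower() if c in allowed)
--     core = ".".join(t for t in filtered.split(".") if t) or "a"
--     core = core[:15].rstrip(".")
--     return core.ljust(3, core[-1])
-- ===== Notes on version B (the rewrite author's own statement) =====
-- stated objective: alternative
-- what changed: A's stateful character-by-character loop that tracks the previous character to drop consecutive dots, plus index-based slicing to trim a leading/trailing dot, is replaced by a tokenization strategy: split the filtered id on the dot character, drop the empty tokens and re-join with a dot, which collapses dot runs and trims boundary dots in one split/join step; truncation+rstrip and ljust replace the index-16 logic and the padding while-loop; Pre_ excludes the all-invalid ids on which A raises IndexError.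
import Mathlib
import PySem

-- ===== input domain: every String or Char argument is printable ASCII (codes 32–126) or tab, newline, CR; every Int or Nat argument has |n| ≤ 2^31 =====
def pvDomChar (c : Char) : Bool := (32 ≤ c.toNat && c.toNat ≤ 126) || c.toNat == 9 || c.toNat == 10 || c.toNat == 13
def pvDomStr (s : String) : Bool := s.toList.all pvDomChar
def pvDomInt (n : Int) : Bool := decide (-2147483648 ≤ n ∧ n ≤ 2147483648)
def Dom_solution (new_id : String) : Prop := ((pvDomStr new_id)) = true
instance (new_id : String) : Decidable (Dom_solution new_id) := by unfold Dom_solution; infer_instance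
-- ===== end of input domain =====

-- B replaces A's stateful consecutive-dot loop and index-based edge trimming by a
-- tokenization: split the filtered id on '.', drop empty tokens, re-join with '.'.
-- Equivalence is proved on Pre_ (ids with at least one allowed character; on the rest A raises IndexError).

-- the character class of step 2
def pvAllowed : List Char := "abcdefghijklmnopqrstuvwxyz0123456789-_.".toList

-- ===== PORT A =====
-- step 2: keep allowed characters
def pvA_step2 (s : List Char) : List Char :=
  s.foldl (fun acc e => if pvAllowed.contains e then acc ++ [e] else acc) []

-- step 3: skip a '.' that repeats the previous kept character (lastChar ported as List Char: "" = [])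
def pvA_step3 (s : List Char) : List Char :=
  (s.foldl (fun (st : List Char × List Char) e =>
      if e == '.' && st.2 == ['.'] then st else (st.1 ++ [e], [e]))
    (([] : List Char), ([] : List Char))).1

-- step 4: step3[0] / step3[1:-1] / step3[0:-1] / step3[-1] (pyGet? none = IndexError, excluded by Pre_)
def pvA_step4 (s3 : List Char) : List Char :=
  match PySem.List.pyGet? s3 0 with
  | none => []           -- step3[0] raises IndexError; outside Pre_
  | some c0 =>
    let s4 := if c0 == '.' then PySem.List.slice s3 (some 1) (some (-1))
              else PySem.List.slice s3 (some 0) (some (-1))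
    match PySem.List.pyGet? s3 (-1) with
    | none => s4         -- unreachable: s3 ≠ [] here
    | some cl => if cl != '.' then s4 ++ [cl] else s4

-- step 6: length-16 truncation honouring a '.' at index 14
def pvA_step6 (s5 : List Char) : List Char :=
  if 16 ≤ s5.length then
    match PySem.List.pyGet? s5 14 with
    | none => s5         -- unreachable: 16 ≤ length
    | some c14 => if c14 == '.' then PySem.List.slice s5 none (some 14)
                  else PySem.List.slice s5 none (some 15)
  else s5

-- step 7: while len(step7) <= 2: step7 += step7[-1]
def pvPad (s : List Char) : List Char :=
  if s.length ≤ 2 then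
    match PySem.List.pyGet? s (-1) with
    | none => s          -- step7[-1] on empty raises; unreachable under Pre_
    | some c => pvPad (s ++ [c])
  else s
termination_by 3 - s.length
decreasing_by simp [List.length_append]; omega

def solution (new_id : String) : String :=
  let step1 := PySem.Chars.lower new_id.toList
  let step2 := pvA_step2 step1
  let step3 := pvA_step3 step2
  let step4 := pvA_step4 step3
  let step5 := if step4 == [] then ['a'] else step4
  let step6 := pvA_step6 step5
  String.ofList (pvPad step6)

-- ===== PORT B =====
-- the rstrip('.') call ported by hand (reverse / dropWhile / reverse): exact for this chars argument
def pvB_rstripDots (s : List Char) : List Char :=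
  ((s.reverse.dropWhile (fun c => c == '.')).reverse)

def solution_alt (new_id : String) : String :=
  -- filtered = "".join(c for c in new_id.lower() if c in allowed)
  let filtered := (PySem.Chars.lower new_id.toList).filter (fun c => pvAllowed.contains c)
  -- core = ".".join(t for t in filtered.split(".") if t) or "a"
  let core0 := PySem.Chars.join ['.'] ((PySem.Chars.splitOn filtered ['.']).filter (fun t => !t.isEmpty))
  let core1 := if core0 == [] then ['a'] else core0
  -- core = core[:15].rstrip(".")
  let core2 := pvB_rstripDots (PySem.List.slice core1 none (some 15))
  -- return core.ljust(3, core[-1])   (core[-1] on [] would raise; unreachable under Pre_)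
  String.ofList (match PySem.List.pyGet? core2 (-1) with
    | none => core2
    | some c => core2 ++ List.replicate (3 - core2.length) c)

-- ===== PRECONDITION & SPEC =====
-- Pre_ excludes exactly the inputs where A raises IndexError at step3[0]: ids whose
-- lowercase form contains no allowed character at all.
def Pre_solution (new_id : String) : Prop :=
  ((PySem.Chars.lower new_id.toList).any (fun c => pvAllowed.contains c)) = true
instance (new_id : String) : Decidable (Pre_solution new_id) := by unfold Pre_solution; infer_instance
def pvWitness_solution : String := "abc"

def Spec_solution (new_id : String) (out : String) : Prop := out = solution_alt new_id
instance (new_id : String) (out : String) : Decidable (Spec_solution new_id out) := by unfold Spec_solution; infer_instance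

-- ===== CLAIM (what is proved, stated in full; the proofs are below) =====
def Claim_equal_solution : Prop := ∀ (new_id : String), Dom_solution new_id → Pre_solution new_id → Spec_solution new_id (solution new_id)

-- ===== LEMMAS AND PROOFS =====

-- "no two consecutive dots"
def pvR (a b : Char) : Prop := ¬(a = '.' ∧ b = '.')

-- A's step-3 loop as a structural recursion (the Bool is "last kept char was '.'")
def pvDedup (b : Bool) : List Char → List Char
  | [] => []
  | c :: t => if c == '.' && b then pvDedup b t else c :: pvDedup (c == '.') t

theorem pvDedup_cons (b : Bool) (c : Char) (t : List Char) :
    pvDedup b (c :: t) = if c == '.' && b then pvDedup b t else c :: pvDedup (c == '.') t := rfl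

theorem pvDedup_false_cons (c : Char) (t : List Char) :
    pvDedup false (c :: t) = c :: pvDedup (c == '.') t := by
  rw [pvDedup_cons]; simp

theorem pvFoldDedup (cs : List Char) : ∀ (acc l : List Char),
    (List.foldl (fun (st : List Char × List Char) e =>
        if e == '.' && st.2 == ['.'] then st else (st.1 ++ [e], [e])) (acc, l) cs).1
    = acc ++ pvDedup (l == ['.']) cs := by
  induction cs with
  | nil => intro acc l; simp [pvDedup]
  | cons c t ih =>
    intro acc l
    rw [List.foldl_cons]
    by_cases h : (c == '.' && l == ['.']) = true
    · rw [if_pos h]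
      rw [ih acc l]
      simp only [Bool.and_eq_true] at h
      rw [pvDedup_cons, if_pos (by simp [h.1, h.2])]
    · rw [if_neg h]
      rw [ih (acc ++ [c]) [c]]
      have hcl : ([c] == ['.']) = (c == '.') := by
        by_cases hc : c = '.' <;> simp [hc]
      rw [hcl]
      rw [pvDedup_cons (l == ['.']) c t, if_neg h]
      simp

theorem pvA_step23 (s : List Char) :
    pvA_step3 (pvA_step2 s) = pvDedup false (s.filter (fun c => pvAllowed.contains c)) := by
  unfold pvA_step2 pvA_step3
  have h2 := PySem.List.foldl_append_if (fun c => pvAllowed.contains c) (fun c => c) s []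
  simp only [] at h2
  rw [h2, List.map_id', List.nil_append]
  rw [pvFoldDedup _ [] []]
  simp

-- pvDedup true skips the leading dot run
theorem pvDedup_true (t : List Char) :
    pvDedup true t = pvDedup false (t.dropWhile (fun c => c == '.')) := by
  induction t with
  | nil => rfl
  | cons c t ih =>
    by_cases hc : c = '.'
    · subst hc
      rw [List.dropWhile_cons_of_pos (by simp)]
      rw [pvDedup_cons, if_pos (by simp)]
      exact ih
    · rw [List.dropWhile_cons_of_neg (by simp [hc])]
      rw [pvDedup_cons, if_neg (by simp [hc]), pvDedup_false_cons]

-- chain invariant: pvDedup output has no two consecutive dots; from a dot state the head is not a dot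
theorem pvDedup_chain (F : List Char) : ∀ b : Bool,
    List.IsChain pvR (pvDedup b F) ∧ (b = true → (pvDedup b F).head? ≠ some '.') := by
  induction F with
  | nil => intro b; exact ⟨List.isChain_nil, by simp [pvDedup]⟩
  | cons c t ih =>
    intro b
    by_cases h : (c == '.' && b) = true
    · rw [pvDedup_cons, if_pos h]
      exact ih b
    · rw [pvDedup_cons, if_neg h]
      refine ⟨?_, ?_⟩
      · apply List.IsChain.cons
        · exact (ih (c == '.')).1
        · intro y hy
          unfold pvR
          rintro ⟨rfl, rfl⟩
          have := (ih (('.' : Char) == '.')).2 (by simp)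
          simp only [Option.mem_def] at hy
          exact this (by simpa using hy)
      · intro hb
        have hc : c ≠ '.' := by
          intro hcc
          exact h (by simp [hcc, hb])
        simp [hc]

theorem pvDedup_false_ne (F : List Char) (h : F ≠ []) : pvDedup false F ≠ [] := by
  cases F with
  | nil => exact absurd rfl h
  | cons c t => rw [pvDedup_false_cons]; simp

theorem pvModifyHead_id {α : Type} (L : List (List α)) :
    List.modifyHead (fun x => x) L = L := by
  cases L <;> rfl

-- ---- splitOn bridge: PySem.Chars.splitOn _ ['.'] is List.splitOnP (· == '.') ----
theorem pvGo_spec : ∀ (fuel : Nat) (l cur : List Char) (acc : List (List Char)), l.length < fuel →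
    PySem.Chars.splitOn.go ['.'] fuel l cur acc
      = acc.reverse ++ List.modifyHead (fun x => cur.reverse ++ x) (List.splitOnP (fun c => c == '.') l) := by
  intro fuel
  induction fuel with
  | zero => intro l cur acc h; omega
  | succ n ih =>
    intro l cur acc h
    cases l with
    | nil =>
      simp [PySem.Chars.splitOn.go, List.splitOnP_nil]
    | cons c rest =>
      rw [show PySem.Chars.splitOn.go ['.'] (n+1) (c :: rest) cur acc
          = if (['.'] : List Char).isPrefixOf (c :: rest)
            then PySem.Chars.splitOn.go ['.'] n (List.drop (['.'] : List Char).length (c :: rest)) [] (cur.reverse :: acc)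
            else PySem.Chars.splitOn.go ['.'] n rest (c :: cur) acc from rfl]
      by_cases hc : c = '.'
      · subst hc
        rw [if_pos (by simp [List.isPrefixOf])]
        simp only [List.length_cons, List.length_nil, List.drop_succ_cons, List.drop_zero]
        rw [ih rest [] (cur.reverse :: acc) (by simpa using Nat.lt_of_succ_lt_succ h)]
        rw [List.splitOnP_cons, if_pos (by simp)]
        simp only [List.modifyHead_cons, List.reverse_nil, List.nil_append, List.reverse_cons,
          List.append_assoc, List.singleton_append]
        rw [pvModifyHead_id]
        simp
      · rw [if_neg (by simp [List.isPrefixOf]; exact fun hh => hc hh.symm)]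
        rw [ih rest (c :: cur) acc (by simpa using Nat.lt_of_succ_lt_succ h)]
        rw [List.splitOnP_cons, if_neg (by simp [hc])]
        rw [List.modifyHead_modifyHead]
        have : ((fun x => cur.reverse ++ x) ∘ List.cons c) = (fun x => (c :: cur).reverse ++ x) := by
          funext x; simp
        rw [this]

theorem pvSplitOn_eq (s : List Char) :
    PySem.Chars.splitOn s ['.'] = List.splitOnP (fun c => c == '.') s := by
  unfold PySem.Chars.splitOn
  rw [pvGo_spec (s.length + 1) s [] [] (by omega)]
  simp only [List.reverse_nil, List.nil_append]
  exact pvModifyHead_id _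

-- ---- intercalate equations ----
theorem pvJoin_single (x : List Char) : List.intercalate ['.'] [x] = x := by
  simp [List.intercalate]

theorem pvJoin_cons2 (x y : List Char) (r : List (List Char)) :
    List.intercalate ['.'] (x :: y :: r) = x ++ '.' :: List.intercalate ['.'] (y :: r) := by
  simp [List.intercalate, List.intersperse]

-- the join of B's nonempty tokens
def pvJ (F : List Char) : List Char :=
  List.intercalate ['.'] ((List.splitOnP (fun c => c == '.') F).filter (fun t => !t.isEmpty))

theorem pvJ_nil : pvJ [] = [] := by
  simp [pvJ, List.splitOnP_nil, List.intercalate]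

theorem pvJ_dot (t : List Char) : pvJ ('.' :: t) = pvJ t := by
  unfold pvJ
  rw [List.splitOnP_cons, if_pos (by simp)]
  simp

theorem pvJ_dropWhile (t : List Char) : pvJ (t.dropWhile (fun c => c == '.')) = pvJ t := by
  induction t with
  | nil => rfl
  | cons c t ih =>
    by_cases hc : c = '.'
    · subst hc
      rw [List.dropWhile_cons_of_pos (by simp), ih, pvJ_dot]
    · rw [List.dropWhile_cons_of_neg (by simp [hc])]

theorem pvJoin_ne (x : List Char) (r : List (List Char)) (hx : x ≠ []) :
    List.intercalate ['.'] (x :: r) ≠ [] := by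
  cases r with
  | nil => rw [pvJoin_single]; exact hx
  | cons y r' => rw [pvJoin_cons2]; simp [hx]

-- ---- rstrip / strip structural lemmas ----
theorem pvStrip_eq (M : List Char) :
    PySem.Chars.stripChars M ['.'] = pvB_rstripDots (M.dropWhile (fun c => c == '.')) := by
  unfold PySem.Chars.stripChars pvB_rstripDots
  have : (fun c => List.contains ['.'] c) = (fun c : Char => c == '.') := by
    funext c; by_cases hc : c = '.' <;> simp [hc]
  rw [this]

theorem pvStrip_cons_dot (X : List Char) :
    PySem.Chars.stripChars ('.' :: X) ['.'] = PySem.Chars.stripChars X ['.'] := by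
  rw [pvStrip_eq, pvStrip_eq, List.dropWhile_cons_of_pos (by simp)]

theorem pvStrip_cons_nondot (c : Char) (X : List Char) (hc : c ≠ '.') :
    PySem.Chars.stripChars (c :: X) ['.'] = pvB_rstripDots (c :: X) := by
  rw [pvStrip_eq, List.dropWhile_cons_of_neg (by simp [hc])]

theorem pvRstrip_cons (c : Char) (X : List Char) (hc : c ≠ '.') :
    pvB_rstripDots (c :: X) = c :: pvB_rstripDots X := by
  unfold pvB_rstripDots
  rw [show (c :: X).reverse = X.reverse ++ [c] by simp]
  rw [List.dropWhile_append]
  by_cases h : (X.reverse.dropWhile (fun c => c == '.')).isEmpty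
  · rw [if_pos h]
    rw [List.dropWhile_cons_of_neg (by simp [hc])]
    rw [List.isEmpty_iff] at h
    simp [h]
  · rw [if_neg h]
    simp

theorem pvRstrip_dot_cons (X : List Char) :
    pvB_rstripDots ('.' :: X) =
      if pvB_rstripDots X = [] then [] else '.' :: pvB_rstripDots X := by
  unfold pvB_rstripDots
  rw [show ('.' :: X).reverse = X.reverse ++ ['.'] by simp]
  rw [List.dropWhile_append]
  by_cases h : (X.reverse.dropWhile (fun c => c == '.')).isEmpty
  · rw [if_pos h]
    rw [List.isEmpty_iff] at h
    simp [h]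
  · rw [if_neg h]
    rw [List.isEmpty_iff] at h
    rw [if_neg (by simp [h])]
    simp

-- heads of pvDedup false / dropWhile results are not dots, so rstrip = strip there
theorem pvStrip_eq_rstrip_of_headed (X : List Char)
    (h : X = [] ∨ ∀ c t, X = c :: t → c ≠ '.') :
    PySem.Chars.stripChars X ['.'] = pvB_rstripDots X := by
  cases X with
  | nil => rfl
  | cons c t =>
    rcases h with h | h
    · exact absurd h (by simp)
    · exact pvStrip_cons_nondot c t (h c t rfl)

-- ---- THE MAIN LEMMA: strip of A's dedup = B's join of nonempty tokens ----
theorem pvMain : ∀ (n : Nat) (F : List Char), F.length ≤ n →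
    PySem.Chars.stripChars (pvDedup false F) ['.'] = pvJ F := by
  intro n
  induction n with
  | zero =>
    intro F hF
    have : F = [] := List.length_eq_zero_iff.mp (Nat.le_zero.mp hF)
    subst this
    rw [pvJ_nil]; rfl
  | succ n ih =>
    intro F hF
    cases F with
    | nil => rw [pvJ_nil]; rfl
    | cons c t =>
      by_cases hc : c = '.'
      · subst hc
        rw [pvDedup_false_cons]
        simp only [show (('.' : Char) == '.') = true by simp]
        rw [pvStrip_cons_dot, pvDedup_true]
        rw [ih _ (le_trans (List.length_dropWhile_le _ _) (by simpa using hF))]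
        rw [pvJ_dropWhile, pvJ_dot]
      · rw [pvDedup_false_cons]
        rw [show ((c == '.')) = false by simp [hc]]
        rw [pvStrip_cons_nondot c _ hc, pvRstrip_cons c _ hc]
        cases t with
        | nil =>
          unfold pvJ
          rw [List.splitOnP_cons, if_neg (by simp [hc]), List.splitOnP_nil]
          simp [pvDedup, pvB_rstripDots, pvJoin_single]
        | cons c2 t2 =>
          by_cases hc2 : c2 = '.'
          · subst hc2
            -- D = pvDedup false ('.'::t2) = '.' :: pvDedup false (dropWhile t2)
            rw [pvDedup_false_cons]
            simp only [show (('.' : Char) == '.') = true by simp]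
            rw [pvDedup_true, pvRstrip_dot_cons]
            have hlen : (t2.dropWhile (fun c => c == '.')).length ≤ n - 1 := by
              have := List.length_dropWhile_le (fun c : Char => c == '.') t2
              simp only [List.length_cons] at hF
              omega
            have hD' : pvB_rstripDots (pvDedup false (t2.dropWhile (fun c => c == '.'))) = pvJ t2 := by
              rw [← pvStrip_eq_rstrip_of_headed]
              · rw [ih _ (le_trans hlen (by omega)), pvJ_dropWhile]
              · cases hdw : t2.dropWhile (fun c => c == '.') with
                | nil => left; simp [pvDedup]
                | cons d r =>
                  right
                  intro c' t' h'
                  have hd : d ≠ '.' := by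
                    have := List.head_dropWhile_not (fun c : Char => c == '.') (l := t2) (by simp [hdw])
                    simp only [hdw] at this
                    simpa using this
                  rw [pvDedup_false_cons] at h'
                  injection h' with h1 h2
                  rw [← h1]
                  exact hd
            rw [hD']
            -- RHS: pvJ (c :: '.' :: t2)
            have hsp2 : pvJ (c :: '.' :: t2)
                = List.intercalate ['.'] ([c] :: (List.splitOnP (fun x => x == '.') t2).filter (fun t => !t.isEmpty)) := by
              unfold pvJ
              rw [List.splitOnP_cons, if_neg (by simp [hc]), List.splitOnP_cons, if_pos (by simp)]
              simp only [List.modifyHead_cons]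
              rw [List.filter_cons_of_pos (by simp)]
            rw [hsp2]
            cases hLf : (List.splitOnP (fun x => x == '.') t2).filter (fun t => !t.isEmpty) with
            | nil =>
              have hJ : pvJ t2 = [] := by
                unfold pvJ; rw [hLf]; simp [List.intercalate]
              rw [hJ, if_pos rfl, pvJoin_single]
            | cons x r =>
              have hx : x ≠ [] := by
                have hmem : x ∈ (List.splitOnP (fun x => x == '.') t2).filter (fun t => !t.isEmpty) := by
                  rw [hLf]; exact List.mem_cons_self
                have := (List.mem_filter.mp hmem).2
                simpa using this
              have hJeq : pvJ t2 = List.intercalate ['.'] (x :: r) := by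
                unfold pvJ; rw [hLf]
              have hne : pvJ t2 ≠ [] := by
                rw [hJeq]; exact pvJoin_ne x r hx
              rw [if_neg hne, pvJoin_cons2, hJeq]
              simp
          · -- t = c2 :: t2 with c2 ≠ '.'
            have hD : pvB_rstripDots (pvDedup false (c2 :: t2)) = pvJ (c2 :: t2) := by
              rw [← pvStrip_eq_rstrip_of_headed]
              · exact ih _ (by simpa using Nat.le_of_succ_le_succ hF)
              · right
                intro c' t' h'
                rw [pvDedup_false_cons] at h'
                injection h' with h1 h2
                rw [← h1]
                exact hc2
            rw [hD]
            -- RHS: pvJ (c :: c2 :: t2) = c :: pvJ (c2 :: t2)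
            cases hsp : List.splitOnP (fun x => x == '.') t2 with
            | nil => exact absurd hsp (List.splitOnP_ne_nil _ _)
            | cons h0 r0 =>
              have hsp1 : List.splitOnP (fun x => x == '.') (c2 :: t2) = (c2 :: h0) :: r0 := by
                rw [List.splitOnP_cons, if_neg (by simp [hc2]), hsp]
                rfl
              have hsp2 : List.splitOnP (fun x => x == '.') (c :: c2 :: t2) = (c :: c2 :: h0) :: r0 := by
                rw [List.splitOnP_cons, if_neg (by simp [hc]), hsp1]
                rfl
              have e1 : pvJ (c2 :: t2)
                  = List.intercalate ['.'] ((c2 :: h0) :: r0.filter (fun t => !t.isEmpty)) := by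
                unfold pvJ; rw [hsp1, List.filter_cons_of_pos (by simp)]
              have e2 : pvJ (c :: c2 :: t2)
                  = List.intercalate ['.'] ((c :: c2 :: h0) :: r0.filter (fun t => !t.isEmpty)) := by
                unfold pvJ; rw [hsp2, List.filter_cons_of_pos (by simp)]
              rw [e1, e2]
              cases hLf : r0.filter (fun t => !t.isEmpty) with
              | nil => rw [pvJoin_single, pvJoin_single]
              | cons y s => rw [pvJoin_cons2, pvJoin_cons2]; simp

-- ---- A-side step 4 / 6 / 7 lemmas (index logic → strip / slice / replicate) ----
theorem pvChain_reverse {M : List Char} (h : List.IsChain pvR M) : List.IsChain pvR M.reverse := by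
  rw [List.isChain_reverse]
  exact (List.IsChain.iff (by intro a b; unfold pvR; tauto)).mp h

theorem pvDropWhile_chain (M : List Char) (h : List.IsChain pvR M) :
    M.dropWhile (fun c => c == '.') = if M.head? = some '.' then M.tail else M := by
  cases M with
  | nil => simp
  | cons a t =>
    by_cases ha : a = '.'
    · subst ha
      rw [if_pos (by simp)]
      rw [List.dropWhile_cons_of_pos (by simp)]
      cases t with
      | nil => simp
      | cons b t' =>
        have hb : b ≠ '.' := by
          have := h.rel_head
          intro hb; exact this ⟨rfl, hb⟩
        simp only [List.tail_cons]
        rw [List.dropWhile_cons_of_neg (by simp [hb])]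
    · rw [if_neg (by simp [ha])]
      rw [List.dropWhile_cons_of_neg (by simp [ha])]

theorem pvRstrip_of_last_dot (M : List Char) (h : List.IsChain pvR M)
    (hl : M.getLast? = some '.') : pvB_rstripDots M = M.dropLast := by
  unfold pvB_rstripDots
  rw [pvDropWhile_chain M.reverse (pvChain_reverse h)]
  rw [if_pos (by rw [List.head?_reverse]; exact hl)]
  rw [List.tail_reverse, List.reverse_reverse]

theorem pvRstrip_of_last_not (M : List Char) (hl : M.getLast? ≠ some '.') :
    pvB_rstripDots M = M := by
  unfold pvB_rstripDots
  cases hM : M.reverse with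
  | nil => simp [List.reverse_eq_nil_iff.mp hM]
  | cons a t =>
    have ha : a ≠ '.' := by
      intro rfl'
      apply hl
      rw [← List.head?_reverse, hM]
      simp [rfl']
    rw [List.dropWhile_cons_of_neg (by simp [ha])]
    rw [← hM, List.reverse_reverse]

theorem pvRstrip_chain (M : List Char) (h : List.IsChain pvR M) :
    List.IsChain pvR (pvB_rstripDots M) := by
  unfold pvB_rstripDots
  apply pvChain_reverse
  exact (pvChain_reverse h).suffix (List.dropWhile_suffix _)

theorem pvRstrip_last (M : List Char) : (pvB_rstripDots M).getLast? ≠ some '.' := by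
  unfold pvB_rstripDots
  rw [List.getLast?_reverse]
  cases hM : M.reverse.dropWhile (fun c => c == '.') with
  | nil => simp
  | cons a t =>
    have := List.head_dropWhile_not (fun c : Char => c == '.') (l := M.reverse) (by simp [hM])
    simp only [hM] at this ⊢
    simpa using this

theorem pvStrip_chain (M : List Char) (h : List.IsChain pvR M) :
    List.IsChain pvR (PySem.Chars.stripChars M ['.']) := by
  rw [pvStrip_eq]
  apply pvRstrip_chain
  exact h.suffix (List.dropWhile_suffix _)

theorem pvStrip_last (M : List Char) : (PySem.Chars.stripChars M ['.']).getLast? ≠ some '.' := by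
  rw [pvStrip_eq]
  exact pvRstrip_last _

-- x[1:-1] on a nonempty list
theorem pvSlice_one_neg_one (a : Char) (t : List Char) :
    PySem.List.slice (a :: t) (some 1) (some (-1)) = t.dropLast := by
  simp [PySem.List.slice, PySem.List.clampIdx]
  rw [if_neg (by omega), List.dropLast_eq_take]

-- step 4 equals the both-ends dot strip
theorem pvStep4_eq (K : List Char) (hne : K ≠ []) (hch : List.IsChain pvR K) :
    pvA_step4 K = PySem.Chars.stripChars K ['.'] := by
  obtain ⟨a, t, rfl⟩ : ∃ a t, K = a :: t := by
    cases K with | nil => exact absurd rfl hne | cons a t => exact ⟨a, t, rfl⟩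
  rw [pvStrip_eq, pvDropWhile_chain _ hch]
  have hget0 : PySem.List.pyGet? (a :: t) 0 = some a := by
    simp [PySem.List.pyGet?, PySem.List.pyIdx?]
  have hlast : PySem.List.pyGet? (a :: t) (-1) = some ((a :: t).getLast (by simp)) := by
    rw [PySem.List.pyGet?_neg_one, List.getLast?_eq_some_getLast]
  simp only [pvA_step4, hget0, hlast]
  by_cases ha : a = '.'
  · subst ha
    rw [if_pos (show (('.' :: t).head? = some '.') by simp)]
    rw [if_pos (show (('.' : Char) == '.') = true by simp)]
    rw [pvSlice_one_neg_one, List.tail_cons]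
    cases t with
    | nil =>
      rw [if_neg (show ¬(((['.'] : List Char).getLast (by simp) != '.') = true) by simp [List.getLast])]
      simp [pvB_rstripDots]
    | cons b t' =>
      have hlt : ('.' :: b :: t').getLast (by simp) = (b :: t').getLast (by simp) :=
        List.getLast_cons (by simp)
      by_cases hdot : (b :: t').getLast (by simp) = '.'
      · rw [if_neg (show ¬((('.' :: b :: t').getLast (by simp) != '.') = true) by simp [hlt, hdot])]
        rw [pvRstrip_of_last_dot (b :: t') (by simpa using hch.tail)
          (show (b :: t').getLast? = some '.' by
            rw [List.getLast?_eq_some_getLast (by simp)]; simp [hdot])]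
      · rw [if_pos (show ((('.' :: b :: t').getLast (by simp) != '.') = true) by simp [hlt, hdot])]
        rw [pvRstrip_of_last_not (b :: t')
          (show (b :: t').getLast? ≠ some '.' by
            rw [List.getLast?_eq_some_getLast (by simp)]; simp [hdot])]
        rw [hlt]
        exact List.dropLast_append_getLast (by simp)
  · rw [if_neg (show ¬((a :: t).head? = some '.') by simp [ha])]
    rw [if_neg (show ¬(((a : Char) == '.') = true) by simp [ha])]
    rw [PySem.List.slice_zero_start, PySem.List.slice_to_neg_one]
    by_cases hdot : (a :: t).getLast (by simp) = '.'
    · rw [if_neg (show ¬(((a :: t).getLast (by simp) != '.') = true) by simp [hdot])]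
      rw [pvRstrip_of_last_dot (a :: t) hch
        (show (a :: t).getLast? = some '.' by
          rw [List.getLast?_eq_some_getLast (by simp)]; simp [hdot])]
    · rw [if_pos (show (((a :: t).getLast (by simp) != '.') = true) by simp [hdot])]
      rw [pvRstrip_of_last_not (a :: t)
        (show (a :: t).getLast? ≠ some '.' by
          rw [List.getLast?_eq_some_getLast (by simp)]; simp [hdot])]
      exact List.dropLast_append_getLast (by simp)

-- step 6 equals the 15-prefix with trailing dots removed, and is nonempty
theorem pvStep6_eq (s5 : List Char) (hne : s5 ≠ []) (hch : List.IsChain pvR s5)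
    (hl : s5.getLast? ≠ some '.') :
    pvA_step6 s5 = pvB_rstripDots (PySem.List.slice s5 none (some 15)) ∧ pvA_step6 s5 ≠ [] := by
  have hslice : PySem.List.slice s5 none (some 15) = s5.take 15 := by
    have := PySem.List.slice_to s5 (b := 15) (by norm_num)
    norm_num at this
    exact this
  rw [hslice]
  by_cases hlen : 16 ≤ s5.length
  · have h14 : PySem.List.pyGet? s5 14 = some (s5[14]'(by omega)) := by
      rw [show (14 : Int) = ((14 : Nat) : Int) by norm_num, PySem.List.pyGet?_natCast]
      exact List.getElem?_eq_getElem (by omega)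
    have htake : s5.take 15 = s5.take 14 ++ [s5[14]'(by omega)] := by
      rw [show (15 : Nat) = 14 + 1 by norm_num, List.take_add_one]
      rw [List.getElem?_eq_getElem (by omega)]
      rfl
    have hs14 : PySem.List.slice s5 none (some 14) = s5.take 14 := by
      have := PySem.List.slice_to s5 (b := 14) (by norm_num)
      norm_num at this
      exact this
    have hs15 := hslice
    have htne : s5.take 14 ≠ [] := by
      intro h
      rcases List.take_eq_nil_iff.mp h with h' | h'
      · exact absurd h' (by norm_num)
      · exact hne h'
    unfold pvA_step6
    rw [if_pos hlen, h14]
    simp only [hs14, hs15]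
    by_cases hdot : s5[14]'(by omega) = '.'
    · rw [if_pos (by simp [hdot])]
      constructor
      · rw [htake, hdot, pvRstrip_of_last_dot (s5.take 14 ++ ['.'])
          (by rw [← hdot, ← htake]; exact hch.take 15)
          (by simp)]
        rw [List.dropLast_concat]
      · exact htne
    · rw [if_neg (by simp [hdot])]
      constructor
      · rw [pvRstrip_of_last_not (s5.take 15) (by rw [htake, List.getLast?_concat]; simp [hdot])]
      · intro h
        rcases List.take_eq_nil_iff.mp h with h' | h'
        · exact absurd h' (by norm_num)
        · exact hne h'
  · constructor
    · unfold pvA_step6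
      rw [if_neg hlen, List.take_of_length_le (by omega), pvRstrip_of_last_not s5 hl]
    · unfold pvA_step6
      rw [if_neg hlen]
      exact hne

-- step 7: the while-loop pads with the last character up to length 3 (= ljust)
theorem pvPad_eq (s : List Char) (hne : s ≠ []) :
    pvPad s = (match PySem.List.pyGet? s (-1) with
        | none => s
        | some c => s ++ List.replicate (3 - s.length) c) := by
  have g1 : ∀ a : Char, PySem.List.pyGet? [a] (-1) = some a := by
    intro a; rw [PySem.List.pyGet?_neg_one]; rfl
  have g2 : ∀ a b : Char, PySem.List.pyGet? [a, b] (-1) = some b := by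
    intro a b; rw [PySem.List.pyGet?_neg_one]; rfl
  match s with
  | [a] =>
    rw [pvPad, if_pos (show ([a] : List Char).length ≤ 2 by simp), g1 a]
    simp only [List.cons_append, List.nil_append]
    rw [pvPad, if_pos (show ([a, a] : List Char).length ≤ 2 by simp), g2 a a]
    simp only [List.cons_append, List.nil_append]
    rw [pvPad, if_neg (show ¬(([a, a, a] : List Char).length ≤ 2) by simp)]
    rfl
  | [a, b] =>
    rw [pvPad, if_pos (show ([a, b] : List Char).length ≤ 2 by simp), g2 a b]
    simp only [List.cons_append, List.nil_append]
    rw [pvPad, if_neg (show ¬(([a, b, b] : List Char).length ≤ 2) by simp)]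
    rfl
  | a :: b :: c :: r =>
    rw [pvPad, if_neg (by simp)]
    have hlast : PySem.List.pyGet? (a :: b :: c :: r) (-1)
        = some ((a :: b :: c :: r).getLast (by simp)) := by
      rw [PySem.List.pyGet?_neg_one, List.getLast?_eq_some_getLast]
    rw [hlast]
    have : 3 - (a :: b :: c :: r).length = 0 := by simp
    rw [this]
    simp

-- ===== VERDICT (by name: the statement is the Claim_ definition above) =====
theorem solution_spec : Claim_equal_solution := by
  intro new_id hdom hpre
  unfold Spec_solution
  unfold Pre_solution at hpre
  simp only [solution, solution_alt]
  rw [pvA_step23]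
  set F := (PySem.Chars.lower new_id.toList).filter (fun c => pvAllowed.contains c) with hF
  have hFne : F ≠ [] := by
    rw [hF]
    intro h
    rw [List.filter_eq_nil_iff] at h
    rw [List.any_eq_true] at hpre
    obtain ⟨x, hx, hpx⟩ := hpre
    exact (h x hx) hpx
  have hKne : pvDedup false F ≠ [] := pvDedup_false_ne F hFne
  have hKch : List.IsChain pvR (pvDedup false F) := (pvDedup_chain F false).1
  rw [pvStep4_eq _ hKne hKch]
  have hcore : PySem.Chars.stripChars (pvDedup false F) ['.'] = pvJ F :=
    pvMain F.length F (le_refl _)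
  have hjoin : PySem.Chars.join ['.'] ((PySem.Chars.splitOn F ['.']).filter (fun t => !t.isEmpty)) = pvJ F := by
    unfold PySem.Chars.join pvJ
    rw [pvSplitOn_eq]
  rw [hjoin, ← hcore]
  set S := PySem.Chars.stripChars (pvDedup false F) ['.'] with hS
  set s5 : List Char := if S == [] then ['a'] else S with hs5
  have hs5ne : s5 ≠ [] := by
    rw [hs5]; split
    · simp
    · rename_i h; simpa using h
  have hs5ch : List.IsChain pvR s5 := by
    rw [hs5]; split
    · exact List.isChain_singleton _
    · exact pvStrip_chain _ hKch
  have hs5l : s5.getLast? ≠ some '.' := by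
    rw [hs5]; split
    · simp
    · exact pvStrip_last _
  obtain ⟨h6eq, h6ne⟩ := pvStep6_eq s5 hs5ne hs5ch hs5l
  rw [pvPad_eq _ h6ne, h6eq]
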